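-- pv_equiv track=rewrite | github.com/sn-talisman/ai-scribe-enterprise | postprocessor/medasr_postprocessor.py | _deduplicate_chars
-- ===== SOURCE A (Python) =====
-- import itertools
--
-- def _deduplicate_chars(word: str) -> set:
--     """
--     Generate variants of a word by collapsing doubled characters.
--     'nnumber' → {'nnumber', 'number'}
--     'therappy' → {'therappy', 'therapy'}
--     'conttinuue' → {'conttinuue', 'conttinue', 'continuue', 'continue'}
--
--     Handles up to 6 doubled-character positions to avoid combinatorial explosion.
--     """
--     word_lower = word.lower()
--
--     # Find positions where characters are doubled
--     double_positions = []
--     i = 0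
--     while i < len(word_lower) - 1:
--         if word_lower[i] == word_lower[i + 1]:
--             double_positions.append(i)
--             i += 2
--         else:
--             i += 1
--
--     if not double_positions:
--         return {word_lower}
--
--     # Cap at 6 to limit search space (2^6 = 64 variants max)
--     double_positions = double_positions[:6]
--     results = set()
--
--     for combo in itertools.product([True, False], repeat=len(double_positions)):
--         chars = list(word_lower)
--         # Process in reverse so index shifts don't matter
--         for keep_double, pos in sorted(zip(combo, double_positions), reverse=True):
--             if not keep_double and pos < len(chars):
--                 del chars[pos]
--         results.add(''.join(chars))
--
--     return results
-- ===== SOURCE B (Python) =====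
-- def _deduplicate_chars(word: str) -> set:
--     """Variants of word with each doubled character optionally collapsed.
--
--     Fold over the doubled positions (ascending): each variant is kept and also
--     expanded with that position's character deleted; a deletion count per
--     variant keeps the original indices valid without processing in reverse.
--     """
--     w = word.lower()
--     positions = []
--     i = 0
--     while i < len(w) - 1:
--         if w[i] == w[i + 1]:
--             positions.append(i)
--             i += 2
--         else:
--             i += 1
--     variants = [(list(w), 0)]
--     for pos in positions[:6]:
--         variants = [nv for v, d in variants
--                     for nv in ((v, d), (v[:pos - d] + v[pos - d + 1:], d + 1))]
--     return {''.join(v) for v, _ in variants}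
-- ===== Notes on version B (the rewrite author's own statement) =====
-- stated objective: simpler
-- what changed: B drops itertools.product and the per-combo reverse-sorted deletion loop: it folds once over the doubled positions (ascending), expanding each variant in place into 'kept' and 'collapsed' versions, carrying a per-variant deletion count so original indices stay valid.
import Mathlib
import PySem

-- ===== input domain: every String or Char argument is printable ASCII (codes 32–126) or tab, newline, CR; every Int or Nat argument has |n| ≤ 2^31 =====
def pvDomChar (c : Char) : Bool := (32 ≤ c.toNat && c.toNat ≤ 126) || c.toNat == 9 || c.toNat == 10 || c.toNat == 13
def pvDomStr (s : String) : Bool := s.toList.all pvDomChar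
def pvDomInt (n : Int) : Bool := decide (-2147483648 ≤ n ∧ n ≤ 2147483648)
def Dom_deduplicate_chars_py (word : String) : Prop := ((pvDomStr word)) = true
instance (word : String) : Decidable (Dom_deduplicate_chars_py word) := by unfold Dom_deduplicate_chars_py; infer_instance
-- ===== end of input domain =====

-- B replaces itertools.product + per-combo reverse-sorted deletion loop by a single fold over the
-- doubled positions that expands each variant in place (objective: simpler; same asymptotic cost).

-- ===== PORT A =====
-- the doubled-position scan (`while i < len-1: … i += 2 / i += 1`); this loop is verbatim the same
-- in both Pythons, so both ports share it.  `getD` is exact: the guard keeps both indices in range.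
def pvScanDoubles (cs : List Char) (i : Nat) : List Nat :=
  if i + 1 < cs.length then
    if cs.getD i ' ' == cs.getD (i + 1) ' ' then i :: pvScanDoubles cs (i + 2)
    else pvScanDoubles cs (i + 1)
  else []
termination_by cs.length - i
decreasing_by all_goals omega

-- list(itertools.product([True, False], repeat=k)) in CPython's order (leftmost component slowest)
def pvProduct : Nat → List (List Bool)
  | 0 => [[]]
  | k + 1 => (pvProduct k).map (fun c => true :: c) ++ (pvProduct k).map (fun c => false :: c)

-- the body of A's inner loop: `if not keep_double and pos < len(chars): del chars[pos]`
def pvADel (chars : List Char) (kp : Bool × Nat) : List Char :=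
  if !kp.1 && decide (kp.2 < chars.length) then chars.take kp.2 ++ chars.drop (kp.2 + 1)
  else chars

def deduplicate_chars_py (word : String) : List String :=
  let word_lower := PySem.Str.lower word
  let wl := word_lower.toList
  let double_positions := pvScanDoubles wl 0
  if double_positions = [] then PySem.Set.ofList [word_lower]
  else
    let dps := double_positions.take 6
    (pvProduct dps.length).foldl
      (fun results combo =>
        PySem.Set.add results (String.ofList
          ((PySem.List.sorted2 (combo.zip dps) (fun q => q.1) (fun q => q.2) true).foldl
            pvADel wl)))
      PySem.Set.empty

-- ===== PORT B =====
-- one fold step of B: every variant (characters, deletions-so-far d) is kept and also expanded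
-- with the character at original position `pos` (currently at index `pos - d`) deleted
def pvBStep (variants : List (List Char × Nat)) (pos : Nat) : List (List Char × Nat) :=
  variants.flatMap (fun vd =>
    [vd, (vd.1.take (pos - vd.2) ++ vd.1.drop (pos - vd.2 + 1), vd.2 + 1)])

def deduplicate_chars_py_alt (word : String) : List String :=
  let w := (PySem.Str.lower word).toList
  let variants := ((pvScanDoubles w 0).take 6).foldl pvBStep [(w, 0)]
  PySem.Set.ofList (variants.map (fun vd => String.ofList vd.1))

-- ===== PRECONDITION & SPEC =====
def Spec_deduplicate_chars_py (word : String) (out : List String) : Prop := out = deduplicate_chars_py_alt word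
instance (word : String) (out : List String) : Decidable (Spec_deduplicate_chars_py word out) := by unfold Spec_deduplicate_chars_py; infer_instance

-- ===== CLAIM (what is proved, stated in full; the proofs are below) =====
def Claim_equal_deduplicate_chars_py : Prop := ∀ (word : String), Dom_deduplicate_chars_py word → Spec_deduplicate_chars_py word (deduplicate_chars_py word)

-- ===== LEMMAS AND PROOFS =====

-- delete the element at index i (a no-op when i is out of range); the core step of both ports
def pvDel (l : List Char) (i : Nat) : List Char := l.take i ++ l.drop (i + 1)

theorem pvDel_nil (i : Nat) : pvDel [] i = [] := by cases i <;> rfl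

theorem pvDel_cons_zero (a : Char) (l : List Char) : pvDel (a :: l) 0 = l := rfl

theorem pvDel_cons_succ (a : Char) (l : List Char) (i : Nat) :
    pvDel (a :: l) (i + 1) = a :: pvDel l i := rfl

theorem pvDel_of_ge (l : List Char) (i : Nat) (h : l.length ≤ i) : pvDel l i = l := by
  unfold pvDel
  rw [List.take_of_length_le h, List.drop_of_length_le (by omega)]
  simp

theorem pvDel_comm (l : List Char) (i j : Nat) (h : i < j) :
    pvDel (pvDel l j) i = pvDel (pvDel l i) (j - 1) := by
  induction l generalizing i j with
  | nil => simp [pvDel_nil]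
  | cons a t ih =>
    obtain ⟨j', rfl⟩ : ∃ j', j = j' + 1 := ⟨j - 1, by omega⟩
    simp only [Nat.add_sub_cancel]
    cases i with
    | zero => simp [pvDel_cons_succ, pvDel_cons_zero]
    | succ i' =>
      obtain ⟨j'', rfl⟩ : ∃ j'', j' = j'' + 1 := ⟨j' - 1, by omega⟩
      simp only [pvDel_cons_succ]
      rw [ih i' (j'' + 1) (by omega)]
      simp

-- delete the positions S (original indices, ascending) from w, largest first, in a context where
-- d characters at original positions below all of S have already been deleted
def pvDdel : List Nat → Nat → List Char → List Char
  | [], _, w => w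
  | p :: S, d, w => pvDel (pvDdel S d w) (p - d)

-- the value B's fold computes along the branch described by one combo (true = keep the double)
def pvG : List Bool → List Nat → List Char × Nat → List Char × Nat
  | [], _, x => x
  | _ :: _, [], x => x
  | true :: c, _ :: ps, x => pvG c ps x
  | false :: c, p :: ps, x => pvG c ps (pvDel x.1 (p - x.2), x.2 + 1)

-- the positions a combo collapses
def pvNegSel : List Bool → List Nat → List Nat
  | [], _ => []
  | _ :: _, [] => []
  | true :: c, _ :: ps => pvNegSel c ps
  | false :: c, p :: ps => p :: pvNegSel c ps

-- the shape pvScanDoubles guarantees: head ≥ d, consecutive positions ≥ 2 apart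
def pvOk : Nat → List Nat → Prop
  | _, [] => True
  | d, p :: S => d ≤ p ∧ pvOk (p + 2) S

-- the comparison `sorted(…, reverse=True)` uses: Python's tuple order on (bool, pos), flipped
def pvBfor (a b : Bool × Nat) : Bool :=
  decide (b.1 < a.1) || (!decide (a.1 < b.1) && decide (b.2 < a.2))

theorem pvOk_mono (b c : Nat) (S : List Nat) (h : b ≤ c) (hS : pvOk c S) : pvOk b S := by
  cases S with
  | nil => trivial
  | cons p S' => exact ⟨le_trans h hS.1, hS.2⟩

theorem pvOk_mem (d : Nat) (S : List Nat) (h : pvOk d S) : ∀ q ∈ S, d ≤ q := by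
  induction S generalizing d with
  | nil => simp
  | cons p S' ih =>
    intro q hq
    rcases List.mem_cons.mp hq with rfl | hq'
    · exact h.1
    · have h1 := h.1
      have h2 := ih (p + 2) h.2 q hq'
      omega

theorem pvOk_take (d : Nat) (S : List Nat) (n : Nat) (h : pvOk d S) : pvOk d (S.take n) := by
  induction S generalizing d n with
  | nil => simp [pvOk]
  | cons p S' ih =>
    cases n with
    | zero => simp [pvOk]
    | succ n' => exact ⟨h.1, ih (p + 2) n' h.2⟩

theorem pvOk_pairwise (d : Nat) (S : List Nat) (h : pvOk d S) : S.Pairwise (· < ·) := by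
  induction S generalizing d with
  | nil => simp
  | cons p S' ih =>
    refine List.pairwise_cons.mpr ⟨fun q hq => ?_, ih (p + 2) h.2⟩
    have := pvOk_mem (p + 2) S' h.2 q hq
    omega

theorem pvOk_scan (cs : List Char) (i : Nat) : pvOk i (pvScanDoubles cs i) := by
  fun_induction pvScanDoubles cs i with
  | case1 i h heq ih => exact ⟨le_refl i, pvOk_mono (i + 2) (i + 2) _ (le_refl _) ih⟩
  | case2 i h heq ih => exact pvOk_mono i (i + 1) _ (by omega) ih
  | case3 i h => trivial

theorem pvNegSel_subset (c : List Bool) (ps : List Nat) : ∀ q ∈ pvNegSel c ps, q ∈ ps := by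
  induction c generalizing ps with
  | nil => simp [pvNegSel]
  | cons b c' ih =>
    cases ps with
    | nil => simp [pvNegSel]
    | cons p ps' =>
      cases b with
      | false =>
        intro q hq
        rcases List.mem_cons.mp hq with rfl | hq'
        · exact List.mem_cons_self ..
        · exact List.mem_cons_of_mem _ (ih ps' q hq')
      | true => exact fun q hq => List.mem_cons_of_mem _ (ih ps' q hq)

theorem pvDdel_del (S : List Nat) (d j : Nat) (w : List Char)
    (h : ∀ q ∈ S, j < q - d) :
    pvDdel S (d + 1) (pvDel w j) = pvDel (pvDdel S d w) j := by
  induction S with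
  | nil => rfl
  | cons q S' ih =>
    simp only [pvDdel]
    rw [ih (fun r hr => h r (List.mem_cons_of_mem _ hr))]
    have hq := h q (List.mem_cons_self ..)
    rw [show q - (d + 1) = q - d - 1 from by omega]
    rw [← pvDel_comm _ j (q - d) (by omega)]

theorem pvG_eq_pvDdel (c : List Bool) (ps : List Nat) (d : Nat) (w : List Char)
    (h : pvOk d ps) :
    (pvG c ps (w, d)).1 = pvDdel (pvNegSel c ps) d w := by
  induction c generalizing ps d w with
  | nil => rfl
  | cons b c' ih =>
    cases ps with
    | nil => rfl
    | cons p ps' =>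
      cases b with
      | true =>
        simp only [pvG, pvNegSel]
        exact ih ps' d w (pvOk_mono d (p + 2) ps' (le_trans h.1 (by omega)) h.2)
      | false =>
        simp only [pvG, pvNegSel, pvDdel]
        rw [ih ps' (d + 1) (pvDel w (p - d))
              (pvOk_mono (d + 1) (p + 2) ps' (by have h1 := h.1; omega) h.2)]
        refine pvDdel_del (pvNegSel c' ps') d (p - d) w (fun q hq => ?_)
        have h1 := pvOk_mem (p + 2) ps' h.2 q (pvNegSel_subset c' ps' q hq)
        have h2 := h.1
        omega

theorem insertBy_append (bf : (Bool × Nat) → (Bool × Nat) → Bool) (x : Bool × Nat)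
    (L1 L2 : List (Bool × Nat)) (h1 : ∀ y ∈ L1, bf x y = false)
    (h2 : ∀ y ∈ L2, bf x y = true) :
    PySem.List.insertBy bf x (L1 ++ L2) = L1 ++ x :: L2 := by
  induction L1 with
  | nil =>
    cases L2 with
    | nil => rfl
    | cons y ys => simp [PySem.List.insertBy, h2 y (List.mem_cons_self ..)]
  | cons y L1' ih =>
    have hy := h1 y (List.mem_cons_self ..)
    simp [PySem.List.insertBy, hy, ih (fun z hz => h1 z (List.mem_cons_of_mem _ hz))]

theorem pvBfor_left_true (p : Nat) (b : Bool) (q : Nat) (h : q < p) :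
    pvBfor (true, p) (b, q) = true := by
  cases b <;> simp [pvBfor, h]

theorem pvBfor_false_true (p q : Nat) : pvBfor (false, p) (true, q) = false := by
  simp [pvBfor]

theorem pvBfor_false_false (p q : Nat) (h : q < p) : pvBfor (false, p) (false, q) = true := by
  simp [pvBfor, h]

theorem sorted_char (xs : List (Bool × Nat)) (hx : xs.Pairwise (fun a b => a.2 < b.2)) :
    xs.foldl (fun acc x => PySem.List.insertBy pvBfor x acc) [] =
      (xs.filter (fun q => q.1)).reverse ++ (xs.filter (fun q => !q.1)).reverse := by
  induction xs using List.reverseRecOn with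
  | nil => rfl
  | append_singleton l x ih =>
    have hl : l.Pairwise (fun a b => a.2 < b.2) := (List.pairwise_append.mp hx).1
    have hlt : ∀ y ∈ l, y.2 < x.2 :=
      fun y hy => (List.pairwise_append.mp hx).2.2 y hy x (by simp)
    rw [List.foldl_append, List.foldl_cons, List.foldl_nil, ih hl]
    obtain ⟨bx, px⟩ := x
    cases bx with
    | true =>
      have hins := insertBy_append pvBfor (true, px) []
          ((l.filter (fun q => q.1)).reverse ++ (l.filter (fun q => !q.1)).reverse)
          (by simp) ?_
      · simp only [List.nil_append] at hins
        rw [hins]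
        simp [List.filter_append]
      · intro y hy
        obtain ⟨by_, qy⟩ := y
        have hyl : (by_, qy) ∈ l := by
          rcases List.mem_append.mp hy with h' | h' <;>
            exact (List.mem_filter.mp (List.mem_reverse.mp h')).1
        exact pvBfor_left_true px by_ qy (hlt _ hyl)
    | false =>
      rw [insertBy_append pvBfor (false, px)
            ((l.filter (fun q => q.1)).reverse) ((l.filter (fun q => !q.1)).reverse) ?_ ?_]
      · simp [List.filter_append]
      · intro y hy
        obtain ⟨by_, qy⟩ := y
        have := List.mem_filter.mp (List.mem_reverse.mp hy)
        have hb : by_ = true := by simpa using this.2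
        subst hb
        exact pvBfor_false_true px qy
      · intro y hy
        obtain ⟨by_, qy⟩ := y
        have := List.mem_filter.mp (List.mem_reverse.mp hy)
        have hb : by_ = false := by simpa using this.2
        subst hb
        exact pvBfor_false_false px qy (hlt _ this.1)

theorem zip_pairwise (c : List Bool) (ps : List Nat) (h : ps.Pairwise (· < ·)) :
    (c.zip ps).Pairwise (fun a b => a.2 < b.2) := by
  induction c generalizing ps with
  | nil => simp
  | cons b c' ih =>
    cases ps with
    | nil => simp
    | cons p ps' =>
      rcases List.pairwise_cons.mp h with ⟨h1, h2⟩
      refine List.pairwise_cons.mpr ⟨?_, ih ps' h2⟩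
      intro y hy
      obtain ⟨yb, yq⟩ := y
      exact h1 yq (List.of_mem_zip hy).2

theorem foldl_ADel_trues (L : List (Bool × Nat)) (w : List Char) (h : ∀ y ∈ L, y.1 = true) :
    L.foldl pvADel w = w := by
  induction L generalizing w with
  | nil => rfl
  | cons y L' ih =>
    have hy : pvADel w y = w := by
      have := h y (List.mem_cons_self ..)
      simp [pvADel, this]
    rw [List.foldl_cons, hy, ih w (fun z hz => h z (List.mem_cons_of_mem _ hz))]

theorem pvADel_false (w : List Char) (p : Nat) : pvADel w (false, p) = pvDel w p := by
  by_cases h : p < w.length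
  · simp [pvADel, pvDel, h]
  · rw [pvDel_of_ge w p (by omega)]
    simp [pvADel, h]

theorem filter_neg_zip (c : List Bool) (ps : List Nat) :
    (c.zip ps).filter (fun q => !q.1) = (pvNegSel c ps).map (fun p => ((false : Bool), p)) := by
  induction c generalizing ps with
  | nil => simp [pvNegSel]
  | cons b c' ih =>
    cases ps with
    | nil => simp [pvNegSel]
    | cons p ps' => cases b <;> simp [pvNegSel, ih ps']

theorem foldl_adel_false (L : List Nat) (w : List Char) :
    L.foldl (fun acc p => pvADel acc (false, p)) w = L.foldl pvDel w := by
  induction L generalizing w with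
  | nil => rfl
  | cons p L' ih =>
    rw [List.foldl_cons, List.foldl_cons, pvADel_false]
    exact ih (pvDel w p)

theorem foldl_del_reverse (S : List Nat) (w : List Char) :
    S.reverse.foldl pvDel w = pvDdel S 0 w := by
  induction S with
  | nil => rfl
  | cons p S' ih => simp [pvDdel, List.foldl_append, ih]

theorem aApply_eq_pvG (c : List Bool) (ps : List Nat) (w : List Char) (h : pvOk 0 ps) :
    (PySem.List.sorted2 (c.zip ps) (fun q => q.1) (fun q => q.2) true).foldl pvADel w
      = (pvG c ps (w, 0)).1 := by
  have hs2 : PySem.List.sorted2 (c.zip ps) (fun q => q.1) (fun q => q.2) true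
      = (c.zip ps).foldl (fun acc x => PySem.List.insertBy pvBfor x acc) [] := rfl
  rw [hs2, sorted_char _ (zip_pairwise c ps (pvOk_pairwise 0 ps h)), List.foldl_append]
  have htr : List.foldl pvADel w ((c.zip ps).filter (fun q => q.1)).reverse = w :=
    foldl_ADel_trues _ w (fun y hy => by
      simpa using (List.mem_filter.mp (List.mem_reverse.mp hy)).2)
  rw [htr, filter_neg_zip, ← List.map_reverse, List.foldl_map]
  rw [foldl_adel_false, foldl_del_reverse, pvG_eq_pvDdel c ps 0 w h]

theorem bstep_append (ps : List Nat) (V W : List (List Char × Nat)) :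
    ps.foldl pvBStep (V ++ W) = ps.foldl pvBStep V ++ ps.foldl pvBStep W := by
  induction ps generalizing V W with
  | nil => rfl
  | cons p ps' ih =>
    simp only [List.foldl_cons]
    rw [show pvBStep (V ++ W) p = pvBStep V p ++ pvBStep W p from by simp [pvBStep]]
    exact ih _ _

theorem bfold_eq_product (ps : List Nat) (x : List Char × Nat) :
    ps.foldl pvBStep [x] = (pvProduct ps.length).map (fun c => pvG c ps x) := by
  induction ps generalizing x with
  | nil => simp [pvProduct, pvG]
  | cons p ps' ih =>
    simp only [List.foldl_cons]
    rw [show pvBStep [x] p = [x] ++ [(pvDel x.1 (p - x.2), x.2 + 1)] from rfl]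
    rw [bstep_append, ih, ih]
    simp only [pvProduct, List.length_cons, List.map_append, List.map_map]
    congr 1

theorem ofList_map_foldl_add {α : Type} [BEq α] (l : List (List Bool)) (f : List Bool → α) :
    l.foldl (fun s c => PySem.Set.add s (f c)) PySem.Set.empty = PySem.Set.ofList (l.map f) := by
  rw [PySem.Set.ofList_eq_foldl, List.foldl_map]
  rfl

-- ===== VERDICT (by name: the statement is the Claim_ definition above) =====
theorem deduplicate_chars_py_spec : Claim_equal_deduplicate_chars_py := by
  intro word _
  unfold Spec_deduplicate_chars_py deduplicate_chars_py deduplicate_chars_py_alt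
  dsimp only
  by_cases hscan : pvScanDoubles (PySem.Str.lower word).toList 0 = []
  · rw [hscan, if_pos rfl]
    simp only [List.take_nil, List.foldl_nil, List.map_cons, List.map_nil,
      String.ofList_toList]
  · rw [if_neg hscan]
    have hok : pvOk 0 ((pvScanDoubles (PySem.Str.lower word).toList 0).take 6) :=
      pvOk_take 0 _ 6 (pvOk_scan (PySem.Str.lower word).toList 0)
    rw [ofList_map_foldl_add, bfold_eq_product, List.map_map]
    congr 1
    apply List.map_congr_left
    intro c _
    simp only [Function.comp]
    rw [aApply_eq_pvG c _ _ hok]
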